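-- pv_equiv track=rewrite | github.com/WooSeok-03/Algorithm | Programmers/Python/Level1/Create_strange_character.py | solution
-- ===== SOURCE A (Python) =====
-- def solution(s):
--     answer = ''
--     count = 0
--
--     str_list = list(s)
--
--     for i in range(len(list(s))):
--         if str_list[i] == " ":
--             count = 0
--             continue
--
--         if count % 2 == 0:
--             str_list[i] = str(str_list[i]).upper()
--         else:
--             str_list[i] = str(str_list[i]).lower()
--         count += 1
--
--     return "".join(str_list)
-- ===== SOURCE B (Python) =====
-- def solution(s):
--     return " ".join(
--         "".join(c.upper() if i % 2 == 0 else c.lower() for i, c in enumerate(word))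
--         for word in s.split(" ")
--     )
-- ===== Notes on version B (the rewrite author's own statement) =====
-- stated objective: simpler
-- what changed: Replaces A's flat index loop over a mutable char list with a counter that resets at spaces by splitting on the single-space separator, transforming each word by its own character index (even uppercased, odd lowercased), and rejoining the words with single spaces.
import Mathlib
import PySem

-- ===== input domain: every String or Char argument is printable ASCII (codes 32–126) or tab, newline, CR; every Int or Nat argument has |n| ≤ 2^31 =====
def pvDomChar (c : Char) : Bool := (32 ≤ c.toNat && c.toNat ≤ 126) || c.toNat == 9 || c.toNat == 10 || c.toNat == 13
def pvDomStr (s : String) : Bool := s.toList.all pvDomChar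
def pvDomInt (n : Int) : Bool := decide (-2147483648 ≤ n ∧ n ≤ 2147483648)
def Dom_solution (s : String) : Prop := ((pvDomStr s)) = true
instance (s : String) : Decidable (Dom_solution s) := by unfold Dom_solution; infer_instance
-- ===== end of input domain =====

-- B replaces A's flat index loop with a resetting counter by split(" ") / per-word
-- enumerate / " ".join — simpler decomposition, same return value on every input.

-- ===== PORT A =====
-- A walks the characters left to right keeping a counter that resets to 0 on ' ';
-- the in-place list rewrite becomes structural recursion producing the new list.
-- str(ch).upper()/.lower() on a single char is PySem.Chars.upperChar/lowerChar.
def solutionGo : List Char → Int → List Char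
  | [], _ => []
  | c :: rest, count =>
      if c = ' ' then c :: solutionGo rest 0
      else (if PySem.Int.mod count 2 = 0 then PySem.Chars.upperChar c
            else PySem.Chars.lowerChar c) :: solutionGo rest (count + 1)

def solution (s : String) : String := String.ofList (solutionGo s.toList 0)

-- ===== PORT B =====
-- one word: index even → upper, odd → lower (enumerate over its characters)
def solutionWord (w : List Char) : List Char :=
  (PySem.List.enumerate w).map
    (fun p => if PySem.Int.mod p.1 2 = 0 then PySem.Chars.upperChar p.2
              else PySem.Chars.lowerChar p.2)

-- " ".join(transform(word) for word in s.split(" "))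
def solution_alt (s : String) : String :=
  String.ofList (PySem.Chars.join [' ']
    ((PySem.Chars.splitOn s.toList [' ']).map solutionWord))

-- ===== PRECONDITION & SPEC =====
def Spec_solution (s : String) (out : String) : Prop := out = solution_alt s
instance (s : String) (out : String) : Decidable (Spec_solution s out) := by unfold Spec_solution; infer_instance

-- ===== CLAIM (what is proved, stated in full; the proofs are below) =====
def Claim_equal_solution : Prop := ∀ (s : String), Dom_solution s → Spec_solution s (solution s)

-- ===== LEMMAS AND PROOFS =====

-- structural version of split on a single character
def splitSp (c : Char) : List Char → List (List Char)
  | [] => [[]]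
  | x :: xs =>
      if x = c then [] :: splitSp c xs
      else (x :: (splitSp c xs).headI) :: (splitSp c xs).tail

lemma splitSp_ne_nil (c : Char) (l : List Char) : splitSp c l ≠ [] := by
  cases l with
  | nil => simp [splitSp]
  | cons x xs =>
      by_cases h : x = c <;> simp [splitSp, h]

lemma splitOn_go_eq (c : Char) :
    ∀ (fuel : Nat) (l cur : List Char) (acc : List (List Char)), l.length ≤ fuel →
      PySem.Chars.splitOn.go [c] fuel l cur acc =
        acc.reverse ++ (splitSp c l).modifyHead (cur.reverse ++ ·) := by
  intro fuel
  induction fuel with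
  | zero =>
      intro l cur acc h
      have hl : l = [] := by cases l <;> simp_all
      subst hl
      simp [PySem.Chars.splitOn.go, splitSp]
  | succ n ih =>
      intro l cur acc h
      cases l with
      | nil => simp [PySem.Chars.splitOn.go, splitSp]
      | cons x xs =>
          by_cases hx : x = c
          · subst hx
            have hpre : List.isPrefixOf [x] (x :: xs) = true := by
              simp [List.isPrefixOf]
            rw [PySem.Chars.splitOn.go]
            simp only [hpre, if_true, List.length_nil, List.drop_succ_cons,
              List.drop_zero, List.length_cons] at *
            rw [ih xs [] (cur.reverse :: acc) (by omega)]
            obtain ⟨h0, t0, ht⟩ := List.exists_cons_of_ne_nil (splitSp_ne_nil x xs)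
            simp [splitSp, ht]
          · have hpre : List.isPrefixOf [c] (x :: xs) = false := by
              simp [List.isPrefixOf]; exact fun hh => (hx hh.symm).elim
            rw [PySem.Chars.splitOn.go]
            simp only [hpre, Bool.false_eq_true, if_false, List.length_cons] at *
            rw [ih xs (x :: cur) acc (by omega)]
            obtain ⟨h0, t0, ht⟩ := List.exists_cons_of_ne_nil (splitSp_ne_nil c xs)
            simp [splitSp, hx, ht]

lemma splitOn_eq_splitSp (c : Char) (l : List Char) :
    PySem.Chars.splitOn l [c] = splitSp c l := by
  have := splitOn_go_eq c (l.length + 1) l [] [] (by omega)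
  simp only [PySem.Chars.splitOn, this, List.reverse_nil, List.nil_append]
  obtain ⟨h0, t0, ht⟩ := List.exists_cons_of_ne_nil (splitSp_ne_nil c l)
  simp [ht]

-- join of the transformed words, with the first word's indices starting at n
def joinW (n : Int) : List (List Char) → List Char
  | [] => []
  | [w] => (PySem.List.enumerate w n).map
      (fun p => if PySem.Int.mod p.1 2 = 0 then PySem.Chars.upperChar p.2
                else PySem.Chars.lowerChar p.2)
  | w :: ws => ((PySem.List.enumerate w n).map
      (fun p => if PySem.Int.mod p.1 2 = 0 then PySem.Chars.upperChar p.2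
                else PySem.Chars.lowerChar p.2)) ++ ' ' :: joinW 0 ws

lemma solutionGo_eq_joinW (l : List Char) :
    ∀ n : Int, solutionGo l n = joinW n (splitSp ' ' l) := by
  induction l with
  | nil => intro n; simp [solutionGo, splitSp, joinW, PySem.List.enumerate]
  | cons x xs ih =>
      intro n
      obtain ⟨h0, t0, ht⟩ := List.exists_cons_of_ne_nil (splitSp_ne_nil ' ' xs)
      by_cases hx : x = ' '
      · subst hx
        simp only [solutionGo, if_true, splitSp, ht, ih 0]
        cases t0 <;> simp [joinW, PySem.List.enumerate]
      · simp only [solutionGo, hx, if_false, splitSp, ht, ih (n + 1)]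
        cases t0 with
        | nil => simp [joinW, PySem.List.enumerate_cons]
        | cons w ws => simp [joinW, PySem.List.enumerate_cons]

lemma join_map_eq_joinW (ws : List (List Char)) :
    PySem.Chars.join [' '] (ws.map solutionWord) = joinW 0 ws := by
  induction ws with
  | nil => simp [PySem.Chars.join, joinW, List.intercalate]
  | cons w ws ih =>
      cases ws with
      | nil => simp [PySem.Chars.join, joinW, solutionWord, List.intercalate]
      | cons w' ws' =>
          simp only [List.map_cons] at ih ⊢
          rw [PySem.Chars.join_cons_cons, ih]
          simp [joinW, solutionWord]

-- ===== VERDICT (by name: the statement is the Claim_ definition above) =====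
theorem solution_spec : Claim_equal_solution := by
  intro s _
  unfold Spec_solution solution solution_alt
  rw [splitOn_eq_splitSp, join_map_eq_joinW, solutionGo_eq_joinW]
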